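-- pv_equiv track=rewrite | github.com/vox-zen/sip-call-visualizer | visualizer/sip_visualizer.py | collect_participants
-- ===== SOURCE A (Python) =====
-- def collect_participants(entries):
--     participants = []
--     seen = set()
--
--     for sender, receiver, _ in entries:
--         if sender not in seen:
--             seen.add(sender)
--             participants.append(sender)
--         if receiver not in seen:
--             seen.add(receiver)
--             participants.append(receiver)
--
--     return participants
-- ===== SOURCE B (Python) =====
-- def collect_participants(entries):
--     # Stage 1: build the endpoint stream (sender then receiver per entry).
--     flat = []
--     for sender, receiver, _ in entries:
--         flat.append(sender)
--         flat.append(receiver)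
--     # Stage 2: positional dedup — keep an element iff it does not occur
--     # anywhere earlier in the stream (no auxiliary seen-set; membership is
--     # decided by scanning the prefix flat[:i]).
--     return [x for i, x in enumerate(flat) if x not in flat[:i]]
-- ===== Notes on version B (the rewrite author's own statement) =====
-- stated objective: alternative
-- what changed: Replaces the single pass with an incrementally maintained seen-set by a two-stage positional algorithm: first build the flat endpoint stream, then keep each element iff it does not occur in the stream's prefix before its own position, deciding duplicates by prefix scans instead of any auxiliary set.
import Mathlib
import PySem

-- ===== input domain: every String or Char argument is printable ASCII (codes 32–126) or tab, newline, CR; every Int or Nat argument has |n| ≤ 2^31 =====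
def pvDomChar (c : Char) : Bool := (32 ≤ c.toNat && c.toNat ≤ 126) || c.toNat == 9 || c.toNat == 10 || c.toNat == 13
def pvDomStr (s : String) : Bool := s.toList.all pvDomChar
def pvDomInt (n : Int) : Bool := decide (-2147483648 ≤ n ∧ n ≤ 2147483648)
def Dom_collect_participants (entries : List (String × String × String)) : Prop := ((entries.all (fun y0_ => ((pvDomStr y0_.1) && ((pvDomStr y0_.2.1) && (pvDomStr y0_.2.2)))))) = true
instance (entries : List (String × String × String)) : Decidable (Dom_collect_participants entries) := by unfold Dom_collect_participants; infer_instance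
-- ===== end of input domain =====

-- B replaces A's seen-set single pass by a positional algorithm (keep an endpoint iff it is absent
-- from the flat stream's prefix before it); same result, no speed claim (B is quadratic).

-- ===== PORT A =====
-- one loop iteration of A: conditionally append sender, then receiver, to (participants, seen)
def pvStepA (st : List String × PySem.Set String) (e : String × String × String) :
    List String × PySem.Set String :=
  let st1 := if st.2.contains e.1 then st else (st.1 ++ [e.1], PySem.Set.add st.2 e.1)
  if st1.2.contains e.2.1 then st1 else (st1.1 ++ [e.2.1], PySem.Set.add st1.2 e.2.1)

def collect_participants (entries : List (String × String × String)) : List String :=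
  (entries.foldl pvStepA ([], PySem.Set.empty)).1

-- ===== PORT B =====
def collect_participants_alt (entries : List (String × String × String)) : List String :=
  -- stage 1: flat = []; for sender, receiver, _ in entries: flat.append(sender); flat.append(receiver)
  let flat := entries.foldl (fun acc e => acc ++ [e.1] ++ [e.2.1]) []
  -- stage 2: [x for i, x in enumerate(flat) if x not in flat[:i]]
  ((PySem.List.enumerate flat 0).filter
      (fun p => !((PySem.List.slice flat none (some p.1)).contains p.2))).map (·.2)

-- ===== PRECONDITION & SPEC =====
def Spec_collect_participants (entries : List (String × String × String)) (out : List String) : Prop := out = collect_participants_alt entries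
instance (entries : List (String × String × String)) (out : List String) : Decidable (Spec_collect_participants entries out) := by unfold Spec_collect_participants; infer_instance

-- ===== CLAIM (what is proved, stated in full; the proofs are below) =====
def Claim_equal_collect_participants : Prop := ∀ (entries : List (String × String × String)), Dom_collect_participants entries → Spec_collect_participants entries (collect_participants entries)

-- ===== LEMMAS AND PROOFS =====

-- B's flattening loop builds the flatMap of the endpoint pairs.
lemma flatB_eq_flatMap (entries : List (String × String × String)) (acc : List String) :
    entries.foldl (fun acc e => acc ++ [e.1] ++ [e.2.1]) acc
      = acc ++ entries.flatMap (fun e => [e.1, e.2.1]) := by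
  induction entries generalizing acc with
  | nil => simp
  | cons e es ih => rw [List.foldl_cons, ih, List.flatMap_cons]; simp

-- A's fold keeps participants = seen, and processes sender then receiver exactly like
-- folding Set.add over the flattened endpoint stream.
lemma foldA_eq_foldAdd (entries : List (String × String × String)) (s : PySem.Set String) :
    entries.foldl pvStepA (s, s) =
      ((entries.flatMap (fun e => [e.1, e.2.1])).foldl PySem.Set.add s,
       (entries.flatMap (fun e => [e.1, e.2.1])).foldl PySem.Set.add s) := by
  induction entries generalizing s with
  | nil => rfl
  | cons e es ih =>
      have hstep : pvStepA (s, s) e =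
          (PySem.Set.add (PySem.Set.add s e.1) e.2.1,
           PySem.Set.add (PySem.Set.add s e.1) e.2.1) := by
        simp only [pvStepA, PySem.Set.add]
        split_ifs <;> simp_all
      simp only [List.foldl_cons, List.flatMap_cons, hstep, ih]
      rfl

-- Positional dedup of l, continued after a prefix pre, equals folding Set.add over l.
lemma key_lemma (l pre : List String) :
    l.foldl PySem.Set.add (PySem.Set.ofList pre)
      = PySem.Set.ofList pre ++
        ((PySem.List.enumerate l (pre.length : Int)).filter
          (fun p => !(((pre ++ l).take p.1.toNat).contains p.2))).map (·.2) := by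
  induction l generalizing pre with
  | nil => simp [PySem.List.enumerate_nil]
  | cons x xs ih =>
      have hhead : ((pre ++ x :: xs).take ((pre.length : Int)).toNat) = pre := by
        simp
      have hLHS : (x :: xs).foldl PySem.Set.add (PySem.Set.ofList pre)
          = xs.foldl PySem.Set.add (PySem.Set.ofList (pre ++ [x])) := by
        simp [PySem.Set.ofList_append_singleton]
      have hassoc : pre ++ x :: xs = (pre ++ [x]) ++ xs := by simp
      have hlen : (pre.length : Int) + 1 = ((pre ++ [x]).length : Int) := by
        simp
      have ih' := ih (pre ++ [x])
      rw [← hassoc, ← hlen] at ih'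
      rw [hLHS, ih', PySem.List.enumerate_cons, List.filter_cons]
      simp only [hhead]
      by_cases hx : x ∈ pre
      · have hofl : PySem.Set.ofList (pre ++ [x]) = PySem.Set.ofList pre := by
          rw [PySem.Set.ofList_append_singleton]
          simp [PySem.Set.add, PySem.Set.contains, PySem.Set.mem_ofList, hx]
        simp [hofl, hx]
      · have hofl : PySem.Set.ofList (pre ++ [x]) = PySem.Set.ofList pre ++ [x] := by
          rw [PySem.Set.ofList_append_singleton]
          simp [PySem.Set.add, PySem.Set.contains, PySem.Set.mem_ofList, hx]
        simp [hofl, hx]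

-- the slice in B's port is the prefix take (indices from enumerate are nonnegative)
lemma filter_slice_eq_take (l : List String) :
    ((PySem.List.enumerate l (0 : Int)).filter
        (fun p => !((PySem.List.slice l none (some p.1)).contains p.2)))
      = ((PySem.List.enumerate l (0 : Int)).filter
        (fun p => !((l.take p.1.toNat).contains p.2))) := by
  apply List.filter_congr
  intro p hp
  obtain ⟨k, hk, rfl⟩ := (PySem.List.mem_enumerate_iff l 0 p).1 hp
  rw [PySem.List.slice_to]
  simp

theorem collect_participants_spec_aux (entries : List (String × String × String)) :
    collect_participants entries = collect_participants_alt entries := by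
  show (entries.foldl pvStepA (PySem.Set.empty, PySem.Set.empty)).1 = _
  simp only [collect_participants_alt]
  rw [flatB_eq_flatMap, List.nil_append, filter_slice_eq_take, foldA_eq_foldAdd]
  have hkey := key_lemma (entries.flatMap (fun e => [e.1, e.2.1])) []
  simpa [PySem.Set.empty] using hkey

-- ===== VERDICT (by name: the statement is the Claim_ definition above) =====
theorem collect_participants_spec : Claim_equal_collect_participants := by
  intro entries _
  exact collect_participants_spec_aux entries
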